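-- pv_equiv track=rewrite | github.com/doitian/readwise-scripts | utils.py | squash_concatenating_highlights
-- ===== SOURCE A (Python) =====
-- def is_concatenating(entry):
--     return (
--         "note" in entry
--         and entry["note"] != ""
--         and entry["note"].split()[0] in [".c1", ".c2", ".c3", ".c4", ".c5"]
--     )
--
-- def concatenate_highlights(highlights):
--     result = highlights[0]
--     result["text"] = " ".join(entry["text"] for entry in highlights)
--     notes = []
--     for entry in highlights:
--         entry_note = entry["note"][3:].strip()
--         if entry_note != "":
--             notes.append(entry_note)
--     if len(notes) > 0:
--         result["note"] = "\n".join(notes)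
--     else:
--         del result["note"]
--
--     return result
--
-- def squash_concatenating_highlights(highlights):
--     pending_spans = []
--     for entry in highlights:
--         if is_concatenating(entry):
--             if entry["note"].split()[0] == ".c1":
--                 if len(pending_spans) > 0:
--                     yield concatenate_highlights(pending_spans)
--                 pending_spans = [entry]
--             else:
--                 pending_spans.append(entry)
--         else:
--             if len(pending_spans) > 0:
--                 yield concatenate_highlights(pending_spans)
--                 pending_spans = []
--             yield entry
--
--     if len(pending_spans) > 0:
--         yield concatenate_highlights(pending_spans)
-- ===== SOURCE B (Python) =====
-- def is_concatenating(entry):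
--     return (
--         "note" in entry
--         and entry["note"] != ""
--         and entry["note"].split()[0] in [".c1", ".c2", ".c3", ".c4", ".c5"]
--     )
--
-- def concatenate_highlights(highlights):
--     result = highlights[0]
--     result["text"] = " ".join(entry["text"] for entry in highlights)
--     notes = []
--     for entry in highlights:
--         entry_note = entry["note"][3:].strip()
--         if entry_note != "":
--             notes.append(entry_note)
--     if len(notes) > 0:
--         result["note"] = "\n".join(notes)
--     else:
--         del result["note"]
--     return result
--
-- def squash_concatenating_highlights(highlights):
--     # Phase 1: group into units (standalone entry, or a run-list of consecutive
--     # concatenating entries; a run is cut before any '.c1' and any non-concatenating entry).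
--     units = []
--     for entry in highlights:
--         if not is_concatenating(entry):
--             units.append(entry)
--         elif entry["note"].split()[0] == ".c1" or not units or not isinstance(units[-1], list):
--             units.append([entry])
--         else:
--             units[-1].append(entry)
--     # Phase 2: emit.
--     for unit in units:
--         yield concatenate_highlights(unit) if isinstance(unit, list) else unit
-- ===== Notes on version B (the rewrite author's own statement) =====
-- stated objective: alternative
-- what changed: A's single interleaved streaming pass with a pending-spans accumulator is replaced by two phases: phase 1 groups the highlights into a unit list (standalone entries vs run-lists of consecutive concatenating entries, cut before '.c1'), phase 2 emits each unit, concatenating the run units.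
import Mathlib
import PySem

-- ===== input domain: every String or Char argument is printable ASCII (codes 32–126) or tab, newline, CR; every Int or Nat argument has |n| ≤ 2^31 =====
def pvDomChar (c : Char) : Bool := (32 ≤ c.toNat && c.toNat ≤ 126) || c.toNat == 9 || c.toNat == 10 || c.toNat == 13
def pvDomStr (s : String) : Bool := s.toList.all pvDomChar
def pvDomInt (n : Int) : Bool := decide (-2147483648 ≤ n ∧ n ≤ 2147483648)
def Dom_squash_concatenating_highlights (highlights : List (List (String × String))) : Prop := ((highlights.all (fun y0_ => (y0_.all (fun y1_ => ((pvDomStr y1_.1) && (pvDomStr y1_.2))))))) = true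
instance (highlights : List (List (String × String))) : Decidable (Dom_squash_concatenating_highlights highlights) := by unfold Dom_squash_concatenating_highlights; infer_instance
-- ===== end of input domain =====

-- B replaces A's interleaved streaming pass by a group-then-emit two-phase pass (objective: alternative
-- decomposition, same cost). Equivalence is about the sequence of yielded values; both Pythons mutate the
-- first entry of each run in place in the same way (shared helper concatenate_highlights).

-- ===== PORT A =====
-- shared helpers: both Python versions call the same is_concatenating / concatenate_highlights
def pvNote? (e : List (String × String)) : Option String := (PySem.Dict.mk e).get? "note"

-- is_concatenating; where Python raises IndexError (nonempty all-whitespace note) this returns false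
-- (such inputs are excluded by Pre_)
def pvIsConcat (e : List (String × String)) : Bool :=
  match pvNote? e with
  | none => false
  | some n => n != "" &&
      (match PySem.Str.split₀ n with
       | [] => false
       | t :: _ => [".c1", ".c2", ".c3", ".c4", ".c5"].contains t)

-- entry["note"].split()[0] (only evaluated on concatenating entries, where it is the head)
def pvTok0 (e : List (String × String)) : String :=
  match pvNote? e with
  | some n => (PySem.Str.split₀ n).headD ""
  | none => ""

-- concatenate_highlights; only ever called on nonempty runs of concatenating entries, so the [] arm and
-- the getD defaults (Python indexes entry["text"] / entry["note"] directly) are unreachable inside Pre_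
def pvConcatHls (run : List (List (String × String))) : List (String × String) :=
  match run with
  | [] => []
  | r0 :: _ =>
    let text := PySem.Str.join " " (run.map (fun e => (PySem.Dict.mk e).getD "text" ""))
    let d1 := (PySem.Dict.mk r0).insert "text" text
    let notes := run.foldl (fun acc e =>
        let en := PySem.Str.strip (PySem.Str.slice ((PySem.Dict.mk e).getD "note" "") (some 3) none)
        if en != "" then acc ++ [en] else acc) []
    (if notes.length > 0 then d1.insert "note" (PySem.Str.join "\n" notes)
     else d1.erase "note").items

def pvFlush (pending : List (List (String × String))) : List (List (String × String)) :=
  if pending.length > 0 then [pvConcatHls pending] else []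

def pvSquashGo (pending : List (List (String × String))) (rest : List (List (String × String))) :
    List (List (String × String)) :=
  match rest with
  | [] => pvFlush pending
  | e :: rest =>
    if pvIsConcat e then
      if pvTok0 e == ".c1" then pvFlush pending ++ pvSquashGo [e] rest
      else pvSquashGo (pending ++ [e]) rest
    else pvFlush pending ++ e :: pvSquashGo [] rest

def squash_concatenating_highlights (highlights : List (List (String × String))) :
    List (List (String × String)) :=
  pvSquashGo [] highlights

-- ===== PORT B =====
-- a unit: Sum.inl = standalone pass-through entry, Sum.inr = run-list of concatenating entries
def pvStep (units : List ((List (String × String)) ⊕ (List (List (String × String)))))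
    (e : List (String × String)) :
    List ((List (String × String)) ⊕ (List (List (String × String)))) :=
  if pvIsConcat e = false then units ++ [Sum.inl e]
  else match units.getLast? with
    | some (Sum.inr run) =>
        if pvTok0 e == ".c1" then units ++ [Sum.inr [e]]
        else units.dropLast ++ [Sum.inr (run ++ [e])]
    | _ => units ++ [Sum.inr [e]]

def pvEmit (u : (List (String × String)) ⊕ (List (List (String × String)))) :
    List (String × String) :=
  match u with
  | Sum.inl e => e
  | Sum.inr run => pvConcatHls run

def squash_concatenating_highlights_alt (highlights : List (List (String × String))) :
    List (List (String × String)) :=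
  (highlights.foldl pvStep []).map pvEmit

-- ===== PRECONDITION & SPEC =====
-- Pre_ excludes exactly the entries on which Python raises: a nonempty all-whitespace note (IndexError
-- in is_concatenating) and a concatenating entry without a "text" key (KeyError in concatenate_highlights).
def pvEntryOK (e : List (String × String)) : Bool :=
  (match (PySem.Dict.mk e).get? "note" with
   | none => true
   | some n => n == "" ||
      (match PySem.Str.split₀ n with
       | [] => false
       | t :: _ => !([".c1", ".c2", ".c3", ".c4", ".c5"].contains t)
                   || (PySem.Dict.mk e).contains "text"))

def Pre_squash_concatenating_highlights (highlights : List (List (String × String))) : Prop :=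
  highlights.all pvEntryOK = true

instance (highlights : List (List (String × String))) :
    Decidable (Pre_squash_concatenating_highlights highlights) := by
  unfold Pre_squash_concatenating_highlights; infer_instance

def pvWitness_squash_concatenating_highlights : (List (List (String × String))) :=
  [[("note", ".c1 hello"), ("text", "a")], [("note", ".c2"), ("text", "b")], [("text", "c")]]

def Spec_squash_concatenating_highlights (highlights : List (List (String × String)))
    (out : List (List (String × String))) : Prop :=
  out = squash_concatenating_highlights_alt highlights

instance (highlights : List (List (String × String))) (out : List (List (String × String))) :
    Decidable (Spec_squash_concatenating_highlights highlights out) := by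
  unfold Spec_squash_concatenating_highlights; infer_instance

-- ===== CLAIM (what is proved, stated in full; the proofs are below) =====
def Claim_equal_squash_concatenating_highlights : Prop :=
  ∀ (highlights : List (List (String × String))),
    Dom_squash_concatenating_highlights highlights →
    Pre_squash_concatenating_highlights highlights →
    Spec_squash_concatenating_highlights highlights (squash_concatenating_highlights highlights)

-- ===== LEMMAS AND PROOFS =====
def pvRep (pending : List (List (String × String))) :
    List ((List (String × String)) ⊕ (List (List (String × String)))) :=
  if pending.length > 0 then [Sum.inr pending] else []

lemma pvRep_map (pending : List (List (String × String))) :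
    (pvRep pending).map pvEmit = pvFlush pending := by
  unfold pvRep pvFlush
  split_ifs <;> simp [pvEmit]

lemma pv_go_eq : ∀ (rest : List (List (String × String)))
    (units : List ((List (String × String)) ⊕ (List (List (String × String)))))
    (pending : List (List (String × String))),
    (pending = [] → ∀ r, units.getLast? ≠ some (Sum.inr r)) →
    ((rest.foldl pvStep (units ++ pvRep pending)).map pvEmit)
      = units.map pvEmit ++ pvSquashGo pending rest := by
  intro rest
  induction rest with
  | nil =>
    intro units pending _
    simp [pvSquashGo, List.foldl, pvRep_map]
  | cons e rest ih =>
    intro units pending hok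
    show ((rest.foldl pvStep (pvStep (units ++ pvRep pending) e)).map pvEmit) = _
    by_cases hC : pvIsConcat e = true
    · by_cases h1 : (pvTok0 e == ".c1") = true
      · -- '.c1': flush pending, start a fresh run
        have hstep : pvStep (units ++ pvRep pending) e
            = (units ++ pvRep pending) ++ pvRep [e] := by
          unfold pvStep pvRep
          by_cases hp : pending.length > 0
          · simp [hC, hp, h1]
          · have hpe : pending = [] := by
              cases pending with
              | nil => rfl
              | cons a l => simp at hp
            have := hok hpe
            simp only [hpe] at *
            simp only [hC, h1]
            cases hlast : units.getLast? with
            | none => simp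
            | some u =>
              cases u with
              | inl x => simp
              | inr r => exact absurd hlast (this r)
        rw [hstep]
        rw [ih ((units ++ pvRep pending)) [e] (by intro h; simp at h)]
        simp [pvSquashGo, hC, h1, pvRep_map]
      · -- '.c2'–'.c5': extend the pending run
        have hstep : pvStep (units ++ pvRep pending) e
            = units ++ pvRep (pending ++ [e]) := by
          unfold pvStep pvRep
          by_cases hp : pending.length > 0
          · simp only [if_pos hp]
            simp [hC, h1]
          · have hpe : pending = [] := by
              cases pending with
              | nil => rfl
              | cons a l => simp at hp
            have := hok hpe
            simp only [hpe] at *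
            simp only [hC, h1]
            cases hlast : units.getLast? with
            | none => simp
            | some u =>
              cases u with
              | inl x => simp
              | inr r => exact absurd hlast (this r)
        rw [hstep]
        rw [ih units (pending ++ [e]) (by intro h; simp at h)]
        simp [pvSquashGo, hC, h1]
    · -- non-concatenating: flush pending, pass the entry through
      have hC' : pvIsConcat e = false := by simpa using hC
      have hstep : pvStep (units ++ pvRep pending) e
          = ((units ++ pvRep pending) ++ [Sum.inl e]) := by
        unfold pvStep; simp [hC']
      rw [hstep, show units ++ pvRep pending ++ [Sum.inl e]
            = (units ++ pvRep pending ++ [Sum.inl e]) ++ pvRep ([] : List (List (String × String)))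
          from by simp [pvRep],
          ih (units ++ pvRep pending ++ [Sum.inl e]) [] (by intro _ r; simp)]
      simp [pvSquashGo, hC', pvRep_map, pvEmit]

-- ===== VERDICT (by name: the statement is the Claim_ definition above) =====
theorem squash_concatenating_highlights_spec : Claim_equal_squash_concatenating_highlights := by
  intro highlights _ _
  unfold Spec_squash_concatenating_highlights squash_concatenating_highlights
    squash_concatenating_highlights_alt
  have h := pv_go_eq highlights [] [] (by intro _ r; simp)
  simpa [pvRep] using h.symm
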